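-- pv_equiv track=rewrite | github.com/HonzaBalvan/zapisy | CUNI/ZS 2025/prog/07/pyramid.py | pyramid_fill
-- ===== SOURCE A (Python) =====
-- def pyramid_fill(n):
--     pyramid = [[None] * (n // 2 + 1) for _ in range(n // 2 + 1)]
--
--     for i in range(n // 2 + 1):
--         for j in range (n // 2 + 1):
--             pyramid[i][j] = 1+i+j
--
--     for i in range(len(pyramid)):
--         pyramid[i] += pyramid[i][::-1]
--         pyramid[i].pop(n // 2)
--         if n % 2 == 0:
--             pyramid[i].pop(n // 2)
--
--     pyramid += pyramid[::-1]
--     pyramid.pop(n // 2)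
--     if n % 2 == 0:
--         pyramid.pop(n // 2)
--
--     return pyramid
-- ===== SOURCE B (Python) =====
-- def pyramid_fill(n):
--     # Closed form: cell (i, j) is 1 + (distance of i to the nearest edge) + (distance of j to it).
--     # The distance vector b is computed once; each of the n//2+1 distinct rows is built once and shared.
--     b = [min(k, n - 1 - k) for k in range(n)]
--     rows = [[1 + s + x for x in b] for s in range(n // 2 + 1)]
--     return [rows[s] for s in b]
-- ===== Notes on version B (the rewrite author's own statement) =====
-- stated objective: simpler
-- what changed: Replaces A's quadrant construction with row/column mirroring and pop-trimming by a precomputed distance-to-nearest-edge vector b, building each of the n//2+1 distinct rows once from the closed formula cell = 1 + b[i] + b[j] and sharing them.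
-- crash fix: For n < 0 A raises IndexError (pop on an empty list) while B returns []. — e.g. on pyramid_fill(-1): A raises IndexError, B returns []
import Mathlib
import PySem

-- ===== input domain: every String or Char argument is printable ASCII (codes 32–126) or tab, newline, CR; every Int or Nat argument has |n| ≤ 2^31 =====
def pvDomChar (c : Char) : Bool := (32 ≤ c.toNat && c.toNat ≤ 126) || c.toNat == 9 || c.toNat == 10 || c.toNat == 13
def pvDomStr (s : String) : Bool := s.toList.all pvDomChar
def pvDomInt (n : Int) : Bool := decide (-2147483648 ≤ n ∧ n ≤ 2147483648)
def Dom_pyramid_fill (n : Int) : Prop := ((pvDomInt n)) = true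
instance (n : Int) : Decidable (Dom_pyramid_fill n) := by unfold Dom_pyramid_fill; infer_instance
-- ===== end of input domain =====

-- ===== PORT A =====
-- B is a structurally different closed-form re-implementation; A raises IndexError for n < 0
-- (excluded by Pre_), where B returns [] (Raises_ block below).
-- list.pop(i): remove index i (Python raises IndexError when out of range; unreachable under Pre_)
def pyPop {α : Type} (xs : List α) (i : Int) : List α :=
  match PySem.List.pop? xs i with
  | some (_, rest) => rest
  | none => []

def pyramid_fill (n : Int) : List (List Int) :=
  let h := PySem.Int.floordiv n 2
  -- the [[None] * (n//2+1) …] grid immediately overwritten with 1+i+j by the fill loops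
  let pyramid : List (List Int) :=
    (PySem.List.pyRange 0 (h + 1) 1).map (fun i =>
      (PySem.List.pyRange 0 (h + 1) 1).map (fun j => 1 + i + j))
  -- per-row: row += row[::-1]; row.pop(n//2); if n % 2 == 0: row.pop(n//2)
  let pyramid := pyramid.map (fun row =>
    let row := row ++ ((PySem.List.slice? row none none (-1)).getD [])
    let row := pyPop row h
    if PySem.Int.mod n 2 == 0 then pyPop row h else row)
  -- pyramid += pyramid[::-1]; pyramid.pop(n//2); if n % 2 == 0: pyramid.pop(n//2)
  let pyramid := pyramid ++ ((PySem.List.slice? pyramid none none (-1)).getD [])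
  let pyramid := pyPop pyramid h
  if PySem.Int.mod n 2 == 0 then pyPop pyramid h else pyramid

-- ===== PORT B =====
def pyramid_fill_alt (n : Int) : List (List Int) :=
  let b := (PySem.List.pyRange 0 n 1).map (fun k => min k (n - 1 - k))
  let rows := (PySem.List.pyRange 0 (PySem.Int.floordiv n 2 + 1) 1).map (fun s => b.map (fun x => 1 + s + x))
  b.map (fun s => (PySem.List.pyGet? rows s).getD [])

-- ===== PRECONDITION & SPEC =====
-- A raises IndexError for n < 0 (pop on an empty list); Pre_ admits exactly the n where A returns.
def Pre_pyramid_fill (n : Int) : Prop := 0 ≤ n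
instance (n : Int) : Decidable (Pre_pyramid_fill n) := by unfold Pre_pyramid_fill; infer_instance
def pvWitness_pyramid_fill : Int := 4

-- For n < 0 A raises IndexError (pop on an empty list) while B returns [].
def Raises_pyramid_fill (n : Int) : Prop := n < 0
instance (n : Int) : Decidable (Raises_pyramid_fill n) := by unfold Raises_pyramid_fill; infer_instance
def pvRaiseWitness_pyramid_fill : Int := -1
def pvRaiseWitnessOut_pyramid_fill : List (List Int) := []

def Spec_pyramid_fill (n : Int) (out : List (List Int)) : Prop := out = pyramid_fill_alt n
instance (n : Int) (out : List (List Int)) : Decidable (Spec_pyramid_fill n out) := by unfold Spec_pyramid_fill; infer_instance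

-- ===== CLAIM (what is proved, stated in full; the proofs are below) =====
def Claim_equal_pyramid_fill : Prop := ∀ (n : Int), Dom_pyramid_fill n → Pre_pyramid_fill n → Spec_pyramid_fill n (pyramid_fill n)
def Claim_raises_pyramid_fill : Prop := (∀ (n : Int), Dom_pyramid_fill n → Raises_pyramid_fill n → ¬ Pre_pyramid_fill n) ∧ (Dom_pyramid_fill (pvRaiseWitness_pyramid_fill) ∧ Raises_pyramid_fill (pvRaiseWitness_pyramid_fill) ∧ pyramid_fill_alt (pvRaiseWitness_pyramid_fill) = pvRaiseWitnessOut_pyramid_fill)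

-- ===== LEMMAS AND PROOFS =====

-- range (h+1) mapped, with the last element dropped, is range h mapped
theorem dropLast_map_range {α : Type} (g : Nat → α) (h : Nat) :
    ((List.range (h + 1)).map g).dropLast = (List.range h).map g := by
  rw [List.range_succ, List.map_append]
  simp

-- the tail of a reversed list is the reverse of dropLast
theorem tail_reverse_eq {α : Type} (L : List α) :
    L.reverse.tail = L.dropLast.reverse := by
  induction L using List.reverseRecOn with
  | nil => simp
  | append_singleton xs x ih => simp

-- removing index h from L ++ L.reverse (|L| = h+1) drops L's last element
theorem eraseIdx_mirror₁ {α : Type} (L : List α) (h : Nat) (hl : L.length = h + 1) :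
    (L ++ L.reverse).eraseIdx h = L.dropLast ++ L.reverse := by
  rw [List.eraseIdx_append_of_lt_length (by omega)]
  congr 1
  rw [List.eraseIdx_eq_take_drop_succ, List.dropLast_eq_take, hl]
  simp [hl]

-- removing index h again (|L| = h+1) drops the reversed copy's first element
theorem eraseIdx_mirror₂ {α : Type} (L : List α) (h : Nat) (hl : L.length = h + 1) :
    (L.dropLast ++ L.reverse).eraseIdx h = L.dropLast ++ L.dropLast.reverse := by
  have hdl : L.dropLast.length = h := by simp [hl]
  rw [List.eraseIdx_append_of_length_le (by omega)]
  rw [hdl, Nat.sub_self, List.eraseIdx_zero, tail_reverse_eq]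

-- the odd mirror: [g (min j (2h - j)) for j in range (2h+1)] = dropLast M ++ reverse M
theorem mirror_odd {α : Type} (g : Nat → α) (h : Nat) :
    (List.range (2 * h + 1)).map (fun j => g (min j (2 * h - j))) =
      ((List.range (h + 1)).map g).dropLast ++ ((List.range (h + 1)).map g).reverse := by
  apply List.ext_getElem
  · simp; omega
  · intro j h1 h2
    simp only [List.getElem_map, List.getElem_range]
    by_cases hj : j < h
    · rw [List.getElem_append_left (by simp; omega)]
      simp only [dropLast_map_range, List.getElem_map, List.getElem_range]
      congr 1
      omega
    · rw [List.getElem_append_right (by simp; omega)]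
      rw [List.getElem_reverse, List.getElem_map, List.getElem_range]
      simp only [List.length_map, List.length_range, List.length_dropLast]
      congr 1
      simp at h1
      omega

-- the even mirror: [g (min j (2h-1-j)) for j in range (2h)] = D ++ reverse D, D = map g (range h)
theorem mirror_even {α : Type} (g : Nat → α) (h : Nat) :
    (List.range (2 * h)).map (fun j => g (min j (2 * h - 1 - j))) =
      (List.range h).map g ++ ((List.range h).map g).reverse := by
  apply List.ext_getElem
  · simp; omega
  · intro j h1 h2
    simp only [List.getElem_map, List.getElem_range]
    by_cases hj : j < h
    · rw [List.getElem_append_left (by simp; omega)]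
      rw [List.getElem_map, List.getElem_range]
      congr 1
      omega
    · rw [List.getElem_append_right (by simp; omega)]
      rw [List.getElem_reverse, List.getElem_map, List.getElem_range]
      simp only [List.length_map, List.length_range]
      congr 1
      simp at h1
      omega

-- helper casts for n = (m : Nat)
theorem floordiv_cast (m : Nat) : PySem.Int.floordiv (m : Int) 2 = ((m / 2 : Nat) : Int) := by
  exact_mod_cast PySem.Int.floordiv_natCast m 2

theorem mod_cast' (m : Nat) : PySem.Int.mod (m : Int) 2 = ((m % 2 : Nat) : Int) := by
  exact_mod_cast PySem.Int.mod_natCast m 2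

theorem beq_cast (m : Nat) : (((m % 2 : Nat) : Int) == (0 : Int)) = ((m % 2) == 0) := by
  rcases Nat.mod_two_eq_zero_or_one m with h | h <;> simp [h]

theorem pyRange_cast (k : Nat) :
    PySem.List.pyRange 0 (k : Int) 1 = (List.range k).map (fun t : Nat => (t : Int)) := by
  rw [PySem.List.pyRange_one]
  simp

-- the quadrant row i of A
def quadRow (h : Nat) (s : Int) : List Int := (List.range (h + 1)).map (fun t : Nat => 1 + s + (t : Int))

-- one mirroring step of A: append the reverse, pop index h, pop again if c
theorem mirror_step {α : Type} (c : Bool) (h : Nat) (row : List α) (hl : row.length = h + 1) :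
    (if c = true then
        pyPop (pyPop (row ++ (PySem.List.slice? row none none (-1)).getD []) ((h : Nat) : Int)) ((h : Nat) : Int)
      else pyPop (row ++ (PySem.List.slice? row none none (-1)).getD []) ((h : Nat) : Int))
      = if c = true then row.dropLast ++ row.dropLast.reverse else row.dropLast ++ row.reverse := by
  rw [PySem.List.slice?_none_none_neg_one, Option.getD_some]
  have hp1 := PySem.List.pop?_natCast (row ++ row.reverse) h
    (by rw [List.length_append, List.length_reverse, hl]; omega)
  have hp2 := PySem.List.pop?_natCast (row.dropLast ++ row.reverse) h
    (by rw [List.length_append, List.length_reverse, List.length_dropLast, hl]; omega)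
  cases c with
  | false =>
    simp only [Bool.false_eq_true, if_false]
    unfold pyPop
    rw [hp1]
    exact eraseIdx_mirror₁ _ h hl
  | true =>
    simp only [if_true]
    unfold pyPop
    rw [hp1]
    simp only
    rw [eraseIdx_mirror₁ _ h hl, hp2]
    exact eraseIdx_mirror₂ _ h hl

-- A's whole body, for n = (m : Nat), rewritten to the mirror normal form
theorem portA_eq (m : Nat) :
    pyramid_fill (m : Int) =
      (let h := m / 2
       let M : List (List Int) :=
         (List.range (h + 1)).map (fun i : Nat =>
           let R := quadRow h (i : Int)
           if m % 2 == 0 then R.dropLast ++ R.dropLast.reverse else R.dropLast ++ R.reverse)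
       if m % 2 == 0 then M.dropLast ++ M.dropLast.reverse else M.dropLast ++ M.reverse) := by
  have hk : ((m / 2 : Nat) : Int) + 1 = ((m / 2 + 1 : Nat) : Int) := by push_cast; ring
  simp only [pyramid_fill, floordiv_cast, mod_cast', beq_cast, hk, pyRange_cast, List.map_map,
    Function.comp_def]
  -- inner rows: each row is mirrored by mirror_step; then the outer list is mirrored the same way
  have hrow : ∀ i : Nat,
      (if (m % 2 == 0) = true then
          pyPop (pyPop ((List.range (m/2+1)).map (fun t : Nat => 1 + (i:Int) + (t:Int)) ++
            (PySem.List.slice? ((List.range (m/2+1)).map (fun t : Nat => 1 + (i:Int) + (t:Int))) none none (-1)).getD []) ((m/2 : Nat) : Int)) ((m/2 : Nat) : Int)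
        else pyPop ((List.range (m/2+1)).map (fun t : Nat => 1 + (i:Int) + (t:Int)) ++
            (PySem.List.slice? ((List.range (m/2+1)).map (fun t : Nat => 1 + (i:Int) + (t:Int))) none none (-1)).getD []) ((m/2 : Nat) : Int))
      = (if m % 2 == 0 then (quadRow (m/2) (i:Int)).dropLast ++ (quadRow (m/2) (i:Int)).dropLast.reverse
         else (quadRow (m/2) (i:Int)).dropLast ++ (quadRow (m/2) (i:Int)).reverse) :=
    fun i => mirror_step (m % 2 == 0) (m/2) _ (by simp)
  rw [List.map_congr_left (fun i _ => hrow i)]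
  rw [mirror_step]
  simp

theorem portB_eq (m : Nat) :
    pyramid_fill_alt (m : Int) =
      (List.range m).map (fun i : Nat =>
        (List.range m).map (fun j : Nat =>
          1 + min (i : Int) ((m : Int) - 1 - i) + min (j : Int) ((m : Int) - 1 - j))) := by
  have hk : ((m / 2 : Nat) : Int) + 1 = ((m / 2 + 1 : Nat) : Int) := by push_cast; ring
  simp only [pyramid_fill_alt, floordiv_cast, hk, pyRange_cast, List.map_map, Function.comp_def]
  apply List.map_congr_left
  intro k hkm
  rw [List.mem_range] at hkm
  have h1 : min ((k : Nat) : Int) ((m : Int) - 1 - k) = ((min k (m - 1 - k) : Nat) : Int) := by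
    push_cast; omega
  rw [h1, PySem.List.pyGet?_natCast, List.getElem?_map,
    List.getElem?_range (show min k (m - 1 - k) < m / 2 + 1 by omega),
    Option.map_some, Option.getD_some]

-- the two parity cases of the main equality
theorem main_odd (h : Nat) :
    pyramid_fill ((2 * h + 1 : Nat) : Int) = pyramid_fill_alt ((2 * h + 1 : Nat) : Int) := by
  rw [portA_eq, portB_eq]
  have hdiv : (2 * h + 1) / 2 = h := by omega
  have hm2 : (2 * h + 1) % 2 = 1 := by omega
  simp only [hdiv, hm2]
  simp only [show ((1:Nat) == 0) = false from rfl, Bool.false_eq_true, if_false]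
  symm
  have hBrow : ∀ i ∈ List.range (2*h+1),
      (List.range (2*h+1)).map (fun j : Nat =>
          1 + min (i:Int) (((2*h+1 : Nat):Int) - 1 - i) + min (j:Int) (((2*h+1:Nat):Int) - 1 - j))
        = (fun s : Nat => (quadRow h (s:Int)).dropLast ++ (quadRow h (s:Int)).reverse) (min i (2*h - i)) := by
    intro i hi
    rw [List.mem_range] at hi
    have h1 : min (i:Int) (((2*h+1:Nat):Int) - 1 - i) = ((min i (2*h - i) : Nat) : Int) := by
      push_cast; omega
    simp only [h1]
    have h2 : ∀ j ∈ List.range (2*h+1),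
        1 + ((min i (2*h-i) : Nat):Int) + min (j:Int) (((2*h+1:Nat):Int) - 1 - j)
          = (fun t : Nat => 1 + ((min i (2*h-i):Nat):Int) + (t:Int)) (min j (2*h - j)) := by
      intro j hj
      rw [List.mem_range] at hj
      have h3 : min (j:Int) (((2*h+1:Nat):Int) - 1 - j) = ((min j (2*h-j):Nat):Int) := by
        push_cast; omega
      rw [h3]
    rw [List.map_congr_left h2]
    exact mirror_odd (fun t : Nat => 1 + ((min i (2*h-i):Nat):Int) + (t:Int)) h
  rw [List.map_congr_left hBrow]
  exact mirror_odd (fun s : Nat => (quadRow h (s:Int)).dropLast ++ (quadRow h (s:Int)).reverse) h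

theorem main_even (h : Nat) :
    pyramid_fill ((2 * h : Nat) : Int) = pyramid_fill_alt ((2 * h : Nat) : Int) := by
  rw [portA_eq, portB_eq]
  have hdiv : (2 * h) / 2 = h := by omega
  have hm2 : (2 * h) % 2 = 0 := by omega
  simp only [hdiv, hm2]
  simp only [show ((0:Nat) == 0) = true from rfl, if_true]
  symm
  have hBrow : ∀ i ∈ List.range (2*h),
      (List.range (2*h)).map (fun j : Nat =>
          1 + min (i:Int) (((2*h : Nat):Int) - 1 - i) + min (j:Int) (((2*h:Nat):Int) - 1 - j))
        = (fun s : Nat => (quadRow h (s:Int)).dropLast ++ (quadRow h (s:Int)).dropLast.reverse) (min i (2*h - 1 - i)) := by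
    intro i hi
    rw [List.mem_range] at hi
    have h1 : min (i:Int) (((2*h:Nat):Int) - 1 - i) = ((min i (2*h - 1 - i) : Nat) : Int) := by
      push_cast; omega
    simp only [h1]
    have h2 : ∀ j ∈ List.range (2*h),
        1 + ((min i (2*h-1-i) : Nat):Int) + min (j:Int) (((2*h:Nat):Int) - 1 - j)
          = (fun t : Nat => 1 + ((min i (2*h-1-i):Nat):Int) + (t:Int)) (min j (2*h - 1 - j)) := by
      intro j hj
      rw [List.mem_range] at hj
      have h3 : min (j:Int) (((2*h:Nat):Int) - 1 - j) = ((min j (2*h-1-j):Nat):Int) := by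
        push_cast; omega
      rw [h3]
    rw [List.map_congr_left h2]
    simp only [quadRow, dropLast_map_range]
    exact mirror_even (fun t : Nat => 1 + ((min i (2*h-1-i):Nat):Int) + (t:Int)) h
  rw [List.map_congr_left hBrow]
  simp only [dropLast_map_range]
  exact mirror_even (fun s : Nat => (quadRow h (s:Int)).dropLast ++ (quadRow h (s:Int)).dropLast.reverse) h

-- ===== VERDICT (by name: the statement is the Claim_ definition above) =====
theorem pyramid_fill_spec : Claim_equal_pyramid_fill := by
  intro n _ hpre
  unfold Pre_pyramid_fill at hpre
  unfold Spec_pyramid_fill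
  obtain ⟨m, rfl⟩ : ∃ m : Nat, n = (m : Int) := ⟨n.toNat, (Int.toNat_of_nonneg hpre).symm⟩
  rcases Nat.even_or_odd m with ⟨h, hh⟩ | ⟨h, hh⟩
  · rw [show m = 2 * h from by omega]
    exact main_even h
  · rw [show m = 2 * h + 1 from by omega]
    exact main_odd h

theorem pyramid_fill_raises : Claim_raises_pyramid_fill := by
  unfold Claim_raises_pyramid_fill
  constructor
  · intro n _ hr; unfold Raises_pyramid_fill at hr; unfold Pre_pyramid_fill; omega
  · refine ⟨by decide, by decide, by decide⟩

-- self-check: at the raise witness, B's port indeed returns the stated literal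
theorem pyramid_fill_raises_ok :
    pyramid_fill_alt pvRaiseWitness_pyramid_fill = pvRaiseWitnessOut_pyramid_fill :=
  pyramid_fill_raises.2.2.2
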